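-- pv_equiv track=rewrite | github.com/joshuadavidthomas/django-language-server | template_linter/src/template_linter/template_syntax/filter_syntax.py | _split_first_unquoted
-- ===== SOURCE A (Python) =====
-- def _split_first_unquoted(s: str, sep: str) -> tuple[str, str | None]:
--     in_quotes = False
--     quote_char = ""
--     for i, ch in enumerate(s):
--         if ch in ("'", '"'):
--             if not in_quotes:
--                 in_quotes = True
--                 quote_char = ch
--             elif quote_char == ch:
--                 in_quotes = False
--                 quote_char = ""
--         if ch == sep and not in_quotes:
--             return s[:i], s[i + 1 :]
--     return s, None
-- ===== SOURCE B (Python) =====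
-- def _split_first_unquoted(s: str, sep: str) -> tuple[str, str | None]:
--     i = 0
--     n = len(s)
--     while i < n:
--         ch = s[i]
--         if ch in ("'", '"'):
--             j = s.find(ch, i + 1)
--             if j == -1:
--                 return s, None
--             i = j + 1
--         elif ch == sep:
--             return s[:i], s[i + 1 :]
--         else:
--             i += 1
--     return s, None
-- ===== Notes on version B (the rewrite author's own statement) =====
-- stated objective: idiomatic
-- what changed: replaces A's per-character quote-state machine (in_quotes/quote_char flags) with an index loop that skips each whole quoted span in one jump via str.find
-- outside the precondition, e.g. on _split_first_unquoted("a'b'c", "'"): A returns ("a'b", 'c'), B returns ("a'b'c", None)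
import Mathlib
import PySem

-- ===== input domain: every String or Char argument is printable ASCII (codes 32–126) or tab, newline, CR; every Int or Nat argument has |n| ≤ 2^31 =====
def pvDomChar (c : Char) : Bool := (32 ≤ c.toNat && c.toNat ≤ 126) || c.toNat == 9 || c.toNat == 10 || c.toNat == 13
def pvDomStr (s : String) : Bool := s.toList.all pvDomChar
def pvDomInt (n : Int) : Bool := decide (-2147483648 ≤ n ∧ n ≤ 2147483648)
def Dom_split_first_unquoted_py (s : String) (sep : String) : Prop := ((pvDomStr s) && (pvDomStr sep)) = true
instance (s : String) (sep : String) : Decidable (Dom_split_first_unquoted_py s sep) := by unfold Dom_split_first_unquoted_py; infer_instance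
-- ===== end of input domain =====

-- B replaces A's per-character quote-state machine by an index loop that jumps
-- over whole quoted spans via str.find (objective: idiomatic; same O(n) cost).

-- ===== PORT A =====
-- the quote-state update of A's loop body (the two ifs on ch, in_quotes, quote_char)
def pvAState (inq : Bool) (qc : String) (ch : Char) : Bool × String :=
  if ch = '\'' ∨ ch = '"' then
    if !inq then (true, String.singleton ch)
    else if qc = String.singleton ch then (false, "")
    else (inq, qc)
  else (inq, qc)

-- A's for-loop: state (in_quotes, quote_char), index i over the remaining characters
def pvALoop (s sep : String) (cs : List Char) (i : Nat) (inq : Bool) (qc : String) :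
    String × Option String :=
  match cs with
  | [] => (s, none)
  | ch :: rest =>
    if String.singleton ch = sep ∧ (pvAState inq qc ch).1 = false then
      (PySem.Str.slice s none (some (i : Int)), some (PySem.Str.slice s (some ((i : Int) + 1)) none))
    else pvALoop s sep rest (i + 1) (pvAState inq qc ch).1 (pvAState inq qc ch).2

def split_first_unquoted_py (s : String) (sep : String) : String × Option String :=
  pvALoop s sep s.toList 0 false ""

-- ===== PORT B =====
-- lower bound on s.find(ch, i+1) when it succeeds; used only for termination of pvBLoop
theorem pvFindFrom_lb (s : String) (c : Char) (i : Nat) (hi : i < s.toList.length)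
    (h : ¬ PySem.Str.findFrom s (String.singleton c) ((i : Int) + 1) none = -1) :
    i < (PySem.Str.findFrom s (String.singleton c) ((i : Int) + 1) none).toNat := by
  rw [PySem.Str.findFrom_eq] at h ⊢
  have hc : ((i : Int) + 1) = ((i + 1 : Nat) : Int) := by push_cast; ring
  rw [hc] at h ⊢
  have := (PySem.Chars.findFrom_natCast_spec s.toList (String.singleton c).toList (i + 1)
    (by omega) h).1
  omega

-- B's while-loop: index i, quoted spans skipped via find
def pvBLoop (s sep : String) (i : Nat) : String × Option String :=
  if h : i < s.toList.length then
    if hq : s.toList[i] = '\'' ∨ s.toList[i] = '"' then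
      if hj : PySem.Str.findFrom s (String.singleton s.toList[i]) ((i : Int) + 1) none = -1 then
        (s, none)
      else
        pvBLoop s sep ((PySem.Str.findFrom s (String.singleton s.toList[i]) ((i : Int) + 1) none).toNat + 1)
    else if String.singleton s.toList[i] = sep then
      (PySem.Str.slice s none (some (i : Int)), some (PySem.Str.slice s (some ((i : Int) + 1)) none))
    else pvBLoop s sep (i + 1)
  else (s, none)
termination_by s.toList.length - i
decreasing_by
  · have := pvFindFrom_lb s (s.toList[i]) i h hj
    omega
  · omega

def split_first_unquoted_py_alt (s : String) (sep : String) : String × Option String :=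
  pvBLoop s sep 0

-- ===== PRECONDITION & SPEC =====
-- Pre_ excludes a separator that is itself a quote character ("'" or '"'): there the quoting
-- rule and the separator interact and no behaviour is specified — A happens to split at a
-- closing quote, B treats the whole quoted span as opaque; both are defensible.
def Pre_split_first_unquoted_py (s : String) (sep : String) : Prop :=
  sep ≠ "'" ∧ sep ≠ "\""
instance (s : String) (sep : String) : Decidable (Pre_split_first_unquoted_py s sep) := by
  unfold Pre_split_first_unquoted_py; infer_instance

def pvWitness_split_first_unquoted_py : String × String := ("a'b,c',d", ",")

def Spec_split_first_unquoted_py (s : String) (sep : String) (out : String × Option String) :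
    Prop := out = split_first_unquoted_py_alt s sep
instance (s : String) (sep : String) (out : String × Option String) :
    Decidable (Spec_split_first_unquoted_py s sep out) := by
  unfold Spec_split_first_unquoted_py; infer_instance

-- ===== CLAIM (what is proved, stated in full; the proofs are below) =====
def Claim_equal_split_first_unquoted_py : Prop := ∀ (s : String) (sep : String), Dom_split_first_unquoted_py s sep → Pre_split_first_unquoted_py s sep → Spec_split_first_unquoted_py s sep (split_first_unquoted_py s sep)

-- ===== LEMMAS AND PROOFS =====

theorem pvSingleton_inj {a b : Char} (h : String.singleton a = String.singleton b) : a = b := by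
  have := congrArg String.toList h
  simpa using this

theorem pvAState_open (ch : Char) (hq : ch = '\'' ∨ ch = '"') :
    pvAState false "" ch = (true, String.singleton ch) := by
  simp [pvAState, hq]

theorem pvAState_plain (ch : Char) (hq : ¬ (ch = '\'' ∨ ch = '"')) :
    pvAState false "" ch = (false, "") := by
  simp [pvAState, hq]

theorem pvAState_close (q : Char) (hq : q = '\'' ∨ q = '"') :
    pvAState true (String.singleton q) q = (false, "") := by
  simp [pvAState, hq]

theorem pvAState_skip (q ch : Char) (hne : ch ≠ q) :
    pvAState true (String.singleton q) ch = (true, String.singleton q) := by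
  unfold pvAState
  by_cases h : ch = '\'' ∨ ch = '"'
  · rw [if_pos h]
    have : String.singleton q ≠ String.singleton ch := fun hc => hne (pvSingleton_inj hc).symm
    simp [this]
  · rw [if_neg h]

-- [c] is a prefix of l.drop j  ↔  l[j]? = some c
theorem pvPrefix_singleton (l : List Char) (j : Nat) (c : Char) :
    [c] <+: l.drop j ↔ l[j]? = some c := by
  have hidx : l[j]? = (l.drop j)[0]? := by simp
  constructor
  · rintro ⟨u, hu⟩
    rw [hidx, ← hu]
    rfl
  · intro h
    rw [hidx] at h
    cases ht : l.drop j with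
    | nil => rw [ht] at h; simp at h
    | cons x u =>
      rw [ht] at h
      simp at h
      exact ⟨u, by simp [h]⟩

-- first-match characterisation of findIdx?
theorem pvFindIdx?_spec {α : Type} (p : α → Bool) (l : List α) :
    ∀ k, l.findIdx? p = some k →
      (∃ x, l[k]? = some x ∧ p x = true) ∧
        (∀ j, j < k → ∀ x, l[j]? = some x → p x = false) := by
  induction l with
  | nil => intro k h; simp at h
  | cons a t ih =>
    intro k h
    rw [List.findIdx?_cons] at h
    by_cases hp : p a = true
    · rw [if_pos hp] at h
      have hk0 : k = 0 := by simpa using h.symm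
      subst hk0
      exact ⟨⟨a, by simp, hp⟩, fun j hj => by omega⟩
    · rw [if_neg hp] at h
      cases hk : t.findIdx? p with
      | none => rw [hk] at h; simp at h
      | some m =>
        rw [hk] at h
        simp at h
        subst h
        obtain ⟨⟨x, hx, hpx⟩, h2⟩ := ih m hk
        refine ⟨⟨x, by simpa using hx, hpx⟩, ?_⟩
        intro j hj y hy
        cases j with
        | zero =>
          have : y = a := by simpa using hy.symm
          subst this
          simpa using hp
        | succ j' => exact h2 j' (by omega) y (by simpa using hy)

-- find of a single character = findIdx?
theorem pvFind_singleton (l : List Char) (c : Char) :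
    PySem.Chars.find l [c] =
      (match l.findIdx? (· == c) with | none => -1 | some k => (k : Int)) := by
  cases h : l.findIdx? (· == c) with
  | none =>
    show PySem.Chars.find l [c] = -1
    have hnm : c ∉ l := by
      intro hc
      have := List.findIdx?_eq_none_iff.1 h c hc
      simp at this
    exact (PySem.Chars.find_eq_neg_one_iff l [c]).2 (fun hinf => hnm (hinf.subset (by simp)))
  | some k =>
    show PySem.Chars.find l [c] = (k : Int)
    obtain ⟨⟨x, hx, hpx⟩, hmin⟩ := pvFindIdx?_spec (· == c) l k h
    have hxc : x = c := by simpa using hpx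
    subst hxc
    have hinf : [x] <:+: l :=
      ((pvPrefix_singleton l k x).2 hx).isInfix.trans (List.drop_suffix k l).isInfix
    have hne : PySem.Chars.find l [x] ≠ -1 := (PySem.Chars.find_ne_neg_one_iff l [x]).2 hinf
    have h0 : PySem.Chars.findFrom l [x] ((0 : Nat) : Int) = PySem.Chars.find l [x] := by
      norm_num [PySem.Chars.findFrom_zero]
    obtain ⟨hge, hpre, hlt⟩ := PySem.Chars.findFrom_natCast_spec l [x] 0 (Nat.zero_le _)
      (by rw [h0]; exact hne)
    rw [h0] at hge hpre hlt
    have hfle : (PySem.Chars.find l [x]).toNat ≤ k := by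
      by_contra hgt
      push Not at hgt
      exact (hlt k (Nat.zero_le _) hgt) ((pvPrefix_singleton l k x).2 hx)
    have hkle : k ≤ (PySem.Chars.find l [x]).toNat := by
      by_contra hgt
      push Not at hgt
      have h1 := (pvPrefix_singleton l (PySem.Chars.find l [x]).toNat x).1 hpre
      have := hmin (PySem.Chars.find l [x]).toNat hgt x h1
      simp at this
    omega

-- A's loop while inside quotes: it scans to the matching quote (sep never fires there)
theorem pvALoop_inq (s sep : String) (q : Char) (hq2 : q = '\'' ∨ q = '"')
    (hq : String.singleton q ≠ sep) (cs : List Char) :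
    ∀ i, pvALoop s sep cs i true (String.singleton q) =
      (match cs.findIdx? (· == q) with
       | none => (s, none)
       | some k => pvALoop s sep (cs.drop (k + 1)) (i + k + 1) false "") := by
  induction cs with
  | nil => intro i; simp [pvALoop]
  | cons ch rest ih =>
    intro i
    by_cases hcq : ch = q
    · subst hcq
      have hfi : (ch :: rest).findIdx? (· == ch) = some 0 := by
        rw [List.findIdx?_cons]; simp
      rw [hfi]
      rw [pvALoop, pvAState_close ch hq2]
      rw [if_neg (fun hc => hq hc.1)]
      simp
    · have hfi : (ch :: rest).findIdx? (· == q) =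
          Option.map (fun i => i + 1) (rest.findIdx? (· == q)) := by
        rw [List.findIdx?_cons]
        simp [hcq]
      rw [hfi]
      rw [pvALoop, pvAState_skip q ch hcq]
      rw [if_neg (fun hc => by simpa using hc.2)]
      rw [ih (i + 1)]
      cases hr : rest.findIdx? (· == q) with
      | none => simp
      | some m =>
        simp only [Option.map_some]
        have : i + 1 + m + 1 = i + (m + 1) + 1 := by ring
        rw [this, List.drop_succ_cons]

-- main correspondence: from an unquoted state at index i the two loops agree
theorem pvMain (s sep : String) (h1 : sep ≠ "'") (h2 : sep ≠ "\"") :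
    ∀ n i, s.toList.length - i ≤ n →
      pvALoop s sep (s.toList.drop i) i false "" = pvBLoop s sep i := by
  intro n
  induction n with
  | zero =>
    intro i hn
    rw [List.drop_eq_nil_of_le (by omega), pvALoop, pvBLoop, dif_neg (by omega)]
  | succ n ih =>
    intro i hn
    by_cases hi : i < s.toList.length
    · have hdrop : s.toList.drop i = s.toList[i] :: s.toList.drop (i + 1) :=
        List.drop_eq_getElem_cons hi
      rw [hdrop, pvBLoop, dif_pos hi]
      by_cases hq : s.toList[i] = '\'' ∨ s.toList[i] = '"'
      · -- quote character: A enters quoted state, B jumps with find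
        rw [dif_pos hq]
        rw [pvALoop, pvAState_open _ hq]
        rw [if_neg (fun hc => by simpa using hc.2)]
        have hsq : String.singleton s.toList[i] ≠ sep := by
          rcases hq with h | h <;> rw [h]
          · intro hc; exact h1 (by rw [← hc]; decide)
          · intro hc; exact h2 (by rw [← hc]; decide)
        rw [pvALoop_inq s sep _ hq hsq _ (i + 1)]
        have hcast : ((i : Int) + 1) = ((i + 1 : Nat) : Int) := by push_cast; ring
        rw [PySem.Str.findFrom_eq, hcast]
        have htl : (String.singleton (s.toList[i])).toList = [s.toList[i]] := by simp
        rw [htl]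
        rw [PySem.Chars.findFrom_natCast s.toList [s.toList[i]] (i + 1) (by omega)]
        rw [pvFind_singleton]
        cases hfi : (s.toList.drop (i + 1)).findIdx? (· == s.toList[i]) with
        | none => simp
        | some k =>
          have hred : (match (some k : Option Nat) with | none => (-1 : Int) | some k => (k : Int))
              = (k : Int) := rfl
          rw [hred, if_neg (by omega), dif_neg (by push_cast; omega)]
          have htn : (((i + 1 : Nat) : Int) + (k : Int)).toNat + 1 = i + k + 2 := by omega
          rw [htn]
          have hdd : (s.toList.drop (i + 1)).drop (k + 1) = s.toList.drop (i + k + 2) := by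
            rw [List.drop_drop]; ring_nf
          have harith : i + 1 + k + 1 = i + k + 2 := by ring
          show pvALoop s sep ((s.toList.drop (i + 1)).drop (k + 1)) (i + 1 + k + 1) false ""
              = pvBLoop s sep (i + k + 2)
          rw [hdd, harith]
          exact ih (i + k + 2) (by omega)
      · rw [dif_neg hq]
        rw [pvALoop, pvAState_plain _ hq]
        by_cases hsep : String.singleton s.toList[i] = sep
        · rw [if_pos ⟨hsep, rfl⟩, if_pos hsep]
        · rw [if_neg (fun hc => hsep hc.1), if_neg hsep]
          exact ih (i + 1) (by omega)
    · rw [List.drop_eq_nil_of_le (by omega), pvALoop, pvBLoop, dif_neg hi]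

-- ===== VERDICT (by name: the statement is the Claim_ definition above) =====
theorem split_first_unquoted_py_spec : Claim_equal_split_first_unquoted_py := by
  intro s sep _ hpre
  unfold Spec_split_first_unquoted_py split_first_unquoted_py split_first_unquoted_py_alt
  have := pvMain s sep hpre.1 hpre.2 s.toList.length 0 (by omega)
  simpa using this
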